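-- pv_equiv track=rewrite | github.com/z1ming/LeetCode-Notebook | source/All_Solutions/1182.与目标颜色间的最短距离/1182-与目标颜色间的最短距离.py | shortestDistanceColor
-- ===== SOURCE A (Python) =====
-- from typing import List
--
-- def shortestDistanceColor(colors: List[int], queries: List[List[int]]) -> List[int]:
--     from bisect import bisect_left
--
--     def take_closest(myList, myNumber):
--         """
--         myList为有序数组, 如何在有序数组中快速插入myNumber,
--         并返回应该插入的索引位置
--         """
--         left, right = 0, len(myList)-1
--
--         while left <= right:
--             mid = (left + right) // 2
--
--             # 如果找到合适位置, 返回
--             if myList[mid] >= myNumber: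
--                 # 判断mid是否为0
--                 if mid == 0:
--                     return 0
--                 elif myList[mid-1] < myNumber:
--                     return mid
--
--                 right = mid - 1
--             else:
--                 left = mid + 1
--
--         return left
--
--
--     from collections import defaultdict
--     from bisect import bisect_left
--     color_index_dict = defaultdict(list)
--
--     for ix, color in enumerate(colors):
--         color_index_dict[color].append(ix)
--
--     ans = []
--     for query in queries:
--         start = query[0]
--         taregt_list = color_index_dict[query[1]]
--         if len(taregt_list) == 0:
--             ans.append(-1)
--             continue
--
--         # 二分查找
--         return_index = take_closest(taregt_list, start)
--
--         if return_index == 0: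
--             ans.append(abs(taregt_list[return_index]-start))
--         elif return_index == len(taregt_list):
--             ans.append(abs(taregt_list[-1] - start))
--         elif taregt_list[return_index] - start > start - taregt_list[return_index-1]:
--             ans.append(abs(start - taregt_list[return_index-1]))
--         else:
--             ans.append(abs(taregt_list[return_index] - start))
--
--     return ans
-- ===== SOURCE B (Python) =====
-- def shortestDistanceColor(colors, queries):
--     res = []
--     for q in queries:
--         i, c = q[0], q[1]
--         best = -1
--         for j, col in enumerate(colors):
--             if col == c:
--                 d = abs(j - i)
--                 if best == -1 or d < best:
--                     best = d
--         res.append(best)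
--     return res
-- ===== Notes on version B (the rewrite author's own statement) =====
-- stated objective: simpler
-- what changed: Drops the per-color index table and the hand-written binary search; B answers each query by a single scan over colors tracking the minimum abs(j - i).
import Mathlib
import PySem

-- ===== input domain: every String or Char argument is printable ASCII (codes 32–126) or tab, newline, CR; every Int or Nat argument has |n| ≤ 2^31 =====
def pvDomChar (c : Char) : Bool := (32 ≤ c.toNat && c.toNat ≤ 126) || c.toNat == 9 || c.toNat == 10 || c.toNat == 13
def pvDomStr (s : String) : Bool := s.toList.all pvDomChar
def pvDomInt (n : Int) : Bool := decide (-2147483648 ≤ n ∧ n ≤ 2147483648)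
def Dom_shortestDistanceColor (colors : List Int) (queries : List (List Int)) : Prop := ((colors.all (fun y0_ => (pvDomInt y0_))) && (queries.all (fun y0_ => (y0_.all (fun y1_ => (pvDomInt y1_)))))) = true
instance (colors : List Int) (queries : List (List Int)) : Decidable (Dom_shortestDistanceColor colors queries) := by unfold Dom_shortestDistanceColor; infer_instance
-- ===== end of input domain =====

-- B replaces A's per-color index table + hand-written binary search by a plain per-query scan
-- over colors tracking the minimum |j - i| (objective: simpler; not faster).


-- ===== PORT A =====
-- take_closest's while-loop; myList[mid] is ported with pyGetD (the reachable calls keep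
-- 0 ≤ left ≤ mid ≤ right < len, so the index is always in range there).
def tcGo (l : List Int) (x : Int) (left right : Int) : Int :=
  if _h : left ≤ right then
    let mid := PySem.Int.floordiv (left + right) 2
    if x ≤ PySem.List.pyGetD l mid 0 then
      if mid = 0 then 0
      else if PySem.List.pyGetD l (mid - 1) 0 < x then mid
      else tcGo l x left (mid - 1)
    else tcGo l x (mid + 1) right
  else left
termination_by (right + 1 - left).toNat
decreasing_by
  · have := PySem.Int.floordiv_two_mid_bounds (lo := left) (hi := right) _h
    omega
  · have := PySem.Int.floordiv_two_mid_bounds (lo := left) (hi := right) _h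
    omega

-- query[0]/query[1] are ported with pyGetD (in range under Pre_); the defaultdict's silent
-- insertion of [] on a missing key never changes any value looked up, so it is not modelled.
def shortestDistanceColor (colors : List Int) (queries : List (List Int)) : List Int :=
  let d := (PySem.List.enumerate colors).foldl
    (fun d p => d.modify p.2 [] (fun l => l ++ [p.1])) PySem.Dict.empty
  queries.foldl (fun ans q =>
    let start := PySem.List.pyGetD q 0 0
    let tl := d.getD (PySem.List.pyGetD q 1 0) []
    if tl.length = 0 then ans ++ [-1]
    else
      let r := tcGo tl start 0 ((tl.length : Int) - 1)
      if r = 0 then ans ++ [|PySem.List.pyGetD tl r 0 - start|]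
      else if r = (tl.length : Int) then ans ++ [|PySem.List.pyGetD tl (-1) 0 - start|]
      else if PySem.List.pyGetD tl r 0 - start > start - PySem.List.pyGetD tl (r - 1) 0 then
        ans ++ [|start - PySem.List.pyGetD tl (r - 1) 0|]
      else ans ++ [|PySem.List.pyGetD tl r 0 - start|]) []

-- ===== PORT B =====
def shortestDistanceColor_alt (colors : List Int) (queries : List (List Int)) : List Int :=
  queries.map (fun q =>
    let i := PySem.List.pyGetD q 0 0
    let c := PySem.List.pyGetD q 1 0
    (PySem.List.enumerate colors).foldl (fun best p =>
      if p.2 == c then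
        let d := |p.1 - i|
        if best == -1 || d < best then d else best
      else best) (-1))

-- ===== PRECONDITION & SPEC =====
-- Both programs read query[0] and query[1]; a query with fewer than two entries makes A (and B)
-- raise IndexError, so exactly those inputs lie outside Pre_.
def Pre_shortestDistanceColor (colors : List Int) (queries : List (List Int)) : Prop :=
  ∀ q ∈ queries, 2 ≤ q.length
instance (colors : List Int) (queries : List (List Int)) : Decidable (Pre_shortestDistanceColor colors queries) := by unfold Pre_shortestDistanceColor; infer_instance
def pvWitness_shortestDistanceColor : List Int × List (List Int) := ([1, 2, 1], [[0, 1], [1, 2], [2, 3]])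

def Spec_shortestDistanceColor (colors : List Int) (queries : List (List Int)) (out : List Int) : Prop := out = shortestDistanceColor_alt colors queries
instance (colors : List Int) (queries : List (List Int)) (out : List Int) : Decidable (Spec_shortestDistanceColor colors queries out) := by unfold Spec_shortestDistanceColor; infer_instance

-- ===== CLAIM (what is proved, stated in full; the proofs are below) =====
def Claim_equal_shortestDistanceColor : Prop := ∀ (colors : List Int) (queries : List (List Int)), Dom_shortestDistanceColor colors queries → Pre_shortestDistanceColor colors queries → Spec_shortestDistanceColor colors queries (shortestDistanceColor colors queries)

-- ===== LEMMAS AND PROOFS =====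

-- A's per-query value (the body of A's query loop, as a value)
def aVal (tl : List Int) (start : Int) : Int :=
  if tl.length = 0 then -1
  else
    let r := tcGo tl start 0 ((tl.length : Int) - 1)
    if r = 0 then |PySem.List.pyGetD tl r 0 - start|
    else if r = (tl.length : Int) then |PySem.List.pyGetD tl (-1) 0 - start|
    else if PySem.List.pyGetD tl r 0 - start > start - PySem.List.pyGetD tl (r - 1) 0 then
      |start - PySem.List.pyGetD tl (r - 1) 0|
    else |PySem.List.pyGetD tl r 0 - start|

-- B's accumulator update and per-query value on the index list
def updMin (x b j : Int) : Int := if b == -1 || |j - x| < b then |j - x| else b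

def bFold (tl : List Int) (x : Int) : Int := tl.foldl (updMin x) (-1)

-- the (strictly increasing) list of indices carrying color c
def tlist (colors : List Int) (c : Int) : List Int :=
  ((PySem.List.enumerate colors).filter (fun p => p.2 == c)).map (fun p => p.1)

-- "v is the minimum of |t - x| over t ∈ tl"
def IsMinD (v : Int) (tl : List Int) (x : Int) : Prop :=
  (∃ t ∈ tl, v = |t - x|) ∧ ∀ t ∈ tl, v ≤ |t - x|

theorem isMinD_unique {v w : Int} {tl : List Int} {x : Int}
    (hv : IsMinD v tl x) (hw : IsMinD w tl x) : v = w := by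
  obtain ⟨⟨tv, htv, hveq⟩, hvle⟩ := hv
  obtain ⟨⟨tw, htw, hweq⟩, hwle⟩ := hw
  have h1 := hvle tw htw
  have h2 := hwle tv htv
  omega

-- A's grouping loop looked up at c yields exactly the index list of color c
theorem dict_getD (colors : List Int) (c : Int) :
    ((PySem.List.enumerate colors).foldl
      (fun d p => d.modify p.2 [] (fun l => l ++ [p.1])) PySem.Dict.empty).getD c []
    = tlist colors c := by
  have h : (PySem.List.enumerate colors).foldl
      (fun d p => d.modify p.2 [] (fun l => l ++ [p.1])) PySem.Dict.empty
      = ((PySem.List.enumerate colors).map (fun p => (p.2, p.1))).foldl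
        (fun d q => d.modify q.1 [] (fun l => l ++ [q.2])) PySem.Dict.empty := by
    rw [List.foldl_map]
  rw [h, PySem.Dict.getD_foldl_modify_append]
  simp [tlist, List.filter_map, List.map_map, Function.comp_def]

theorem tlist_sorted (colors : List Int) (c : Int) :
    (tlist colors c).Pairwise (· < ·) :=
  List.Pairwise.map _ (fun _ _ h => h)
    (List.Pairwise.filter _ (PySem.List.pairwise_lt_enumerate colors 0))

theorem getD_mono (tl : List Int) (hs : tl.Pairwise (· < ·)) {a b : Int}
    (ha : 0 ≤ a) (hab : a ≤ b) (hb : b < (tl.length : Int)) :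
    PySem.List.pyGetD tl a 0 ≤ PySem.List.pyGetD tl b 0 := by
  rw [PySem.List.pyGetD_eq_getElem tl 0 ha (by omega),
      PySem.List.pyGetD_eq_getElem tl 0 (by omega) hb]
  rcases eq_or_lt_of_le hab with h | h
  · subst h; exact le_refl _
  · exact le_of_lt ((List.pairwise_iff_getElem.mp hs) a.toNat b.toNat (by omega) (by omega) (by omega))

-- the while-loop invariant of take_closest: left of `left` everything is < x,
-- right of `right` everything is ≥ x; the result is the bisect_left position
theorem tcGo_char (tl : List Int) (x : Int) (left right : Int) :
    0 ≤ left → left ≤ right + 1 → right ≤ (tl.length : Int) - 1 →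
    (left = 0 ∨ PySem.List.pyGetD tl (left - 1) 0 < x) →
    (right = (tl.length : Int) - 1 ∨ x ≤ PySem.List.pyGetD tl (right + 1) 0) →
    (0 ≤ tcGo tl x left right ∧ tcGo tl x left right ≤ (tl.length : Int)) ∧
    (tcGo tl x left right = 0 ∨ PySem.List.pyGetD tl (tcGo tl x left right - 1) 0 < x) ∧
    (tcGo tl x left right = (tl.length : Int) ∨ x ≤ PySem.List.pyGetD tl (tcGo tl x left right) 0) := by
  fun_induction tcGo tl x left right with
  | case1 left right _h mid hx hm0 =>
    intro h0 h1 h2 hl hr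
    have hmb := PySem.Int.floordiv_two_mid_bounds (lo := left) (hi := right) _h
    refine ⟨⟨by omega, by omega⟩, Or.inl rfl, Or.inr ?_⟩
    rw [hm0] at hx; exact hx
  | case2 left right _h mid hx hm0 hprev =>
    intro h0 h1 h2 hl hr
    have hmb := PySem.Int.floordiv_two_mid_bounds (lo := left) (hi := right) _h
    exact ⟨⟨by omega, by omega⟩, Or.inr hprev, Or.inr hx⟩
  | case3 left right _h mid hx hm0 hprev ih =>
    intro h0 h1 h2 hl hr
    have hmb := PySem.Int.floordiv_two_mid_bounds (lo := left) (hi := right) _h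
    exact ih h0 (by omega) (by omega) hl (Or.inr (by simpa using hx))
  | case4 left right _h mid hx ih =>
    intro h0 h1 h2 hl hr
    have hmb := PySem.Int.floordiv_two_mid_bounds (lo := left) (hi := right) _h
    exact ih (by omega) (by omega) h2 (Or.inr (by simpa using not_le.mp hx)) hr
  | case5 left right _h =>
    intro h0 h1 h2 hl hr
    have hlr : left = right + 1 := by omega
    refine ⟨⟨by omega, by omega⟩, hl, ?_⟩
    rcases hr with h | h
    · left; omega
    · right; rw [hlr]; exact h

theorem aVal_spec (tl : List Int) (x : Int) (hs : tl.Pairwise (· < ·)) (hne : tl ≠ []) :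
    IsMinD (aVal tl x) tl x := by
  have hn : 0 < tl.length := List.length_pos_iff.mpr hne
  obtain ⟨⟨hr0, hrN⟩, hc2, hc3⟩ :=
    tcGo_char tl x 0 ((tl.length : Int) - 1) (le_refl 0) (by omega) (by omega)
      (Or.inl rfl) (Or.inl rfl)
  set r := tcGo tl x 0 ((tl.length : Int) - 1) with hrdef
  have hmem : ∀ a : Int, 0 ≤ a → a < (tl.length : Int) → PySem.List.pyGetD tl a 0 ∈ tl := by
    intro a h1 h2
    exact PySem.List.pyGetD_mem tl 0 ⟨by omega, h2⟩
  have hidx : ∀ t ∈ tl, ∃ a : Int, 0 ≤ a ∧ a < (tl.length : Int) ∧ t = PySem.List.pyGetD tl a 0 := by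
    intro t ht
    obtain ⟨k, hk, rfl⟩ := List.mem_iff_getElem.mp ht
    refine ⟨(k : Int), by omega, by omega, ?_⟩
    rw [PySem.List.pyGetD_eq_getElem tl 0 (by omega) (by omega)]
    simp
  have hlast : PySem.List.pyGetD tl (-1) 0 = PySem.List.pyGetD tl ((tl.length : Int) - 1) 0 := by
    rw [PySem.List.pyGetD_neg_one tl 0 hne, List.getLast_eq_getElem,
        PySem.List.pyGetD_eq_getElem tl 0 (by omega) (by omega)]
    congr 1
    omega
  rw [aVal]
  rw [if_neg (by omega)]
  simp only [← hrdef]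
  by_cases h0 : r = 0
  · rw [if_pos h0, h0]
    have hx0 : x ≤ PySem.List.pyGetD tl 0 0 := by
      have h := hc3.resolve_left (by omega)
      rwa [h0] at h
    constructor
    · exact ⟨_, hmem 0 (le_refl 0) (by omega), rfl⟩
    · intro t ht
      obtain ⟨a, ha1, ha2, rfl⟩ := hidx t ht
      have hmono := getD_mono tl hs (le_refl 0) ha1 ha2
      rcases abs_cases (PySem.List.pyGetD tl 0 0 - x) with ⟨he1, he2⟩ | ⟨he1, he2⟩ <;>
        rcases abs_cases (PySem.List.pyGetD tl a 0 - x) with ⟨hf1, hf2⟩ | ⟨hf1, hf2⟩ <;> omega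
  · rw [if_neg h0]
    by_cases hN : r = (tl.length : Int)
    · rw [if_pos hN]
      have hlt : PySem.List.pyGetD tl ((tl.length : Int) - 1) 0 < x := by
        have h := hc2.resolve_left (by omega)
        rwa [hN] at h
      rw [hlast]
      constructor
      · exact ⟨_, hmem _ (by omega) (by omega), rfl⟩
      · intro t ht
        obtain ⟨a, ha1, ha2, rfl⟩ := hidx t ht
        have hmono := getD_mono tl hs ha1 (by omega : a ≤ (tl.length : Int) - 1) (by omega)
        rcases abs_cases (PySem.List.pyGetD tl ((tl.length : Int) - 1) 0 - x) with ⟨he1, he2⟩ | ⟨he1, he2⟩ <;>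
          rcases abs_cases (PySem.List.pyGetD tl a 0 - x) with ⟨hf1, hf2⟩ | ⟨hf1, hf2⟩ <;> omega
    · rw [if_neg hN]
      have hprev : PySem.List.pyGetD tl (r - 1) 0 < x := hc2.resolve_left h0
      have hcur : x ≤ PySem.List.pyGetD tl r 0 := hc3.resolve_left hN
      by_cases hcmp : PySem.List.pyGetD tl r 0 - x > x - PySem.List.pyGetD tl (r - 1) 0
      · rw [if_pos hcmp, abs_sub_comm]
        constructor
        · exact ⟨_, hmem (r - 1) (by omega) (by omega), rfl⟩
        · intro t ht
          obtain ⟨a, ha1, ha2, rfl⟩ := hidx t ht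
          rcases le_or_gt a (r - 1) with hk | hk
          · have hmono := getD_mono tl hs ha1 hk (by omega)
            rcases abs_cases (PySem.List.pyGetD tl (r - 1) 0 - x) with ⟨he1, he2⟩ | ⟨he1, he2⟩ <;>
              rcases abs_cases (PySem.List.pyGetD tl a 0 - x) with ⟨hf1, hf2⟩ | ⟨hf1, hf2⟩ <;> omega
          · have hmono := getD_mono tl hs (by omega : (0:Int) ≤ r) (by omega : r ≤ a) ha2
            rcases abs_cases (PySem.List.pyGetD tl (r - 1) 0 - x) with ⟨he1, he2⟩ | ⟨he1, he2⟩ <;>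
              rcases abs_cases (PySem.List.pyGetD tl a 0 - x) with ⟨hf1, hf2⟩ | ⟨hf1, hf2⟩ <;> omega
      · rw [if_neg hcmp]
        constructor
        · exact ⟨_, hmem r (by omega) (by omega), rfl⟩
        · intro t ht
          obtain ⟨a, ha1, ha2, rfl⟩ := hidx t ht
          rcases le_or_gt a (r - 1) with hk | hk
          · have hmono := getD_mono tl hs ha1 hk (by omega)
            rcases abs_cases (PySem.List.pyGetD tl r 0 - x) with ⟨he1, he2⟩ | ⟨he1, he2⟩ <;>
              rcases abs_cases (PySem.List.pyGetD tl a 0 - x) with ⟨hf1, hf2⟩ | ⟨hf1, hf2⟩ <;> omega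
          · have hmono := getD_mono tl hs (by omega : (0:Int) ≤ r) (by omega : r ≤ a) ha2
            rcases abs_cases (PySem.List.pyGetD tl r 0 - x) with ⟨he1, he2⟩ | ⟨he1, he2⟩ <;>
              rcases abs_cases (PySem.List.pyGetD tl a 0 - x) with ⟨hf1, hf2⟩ | ⟨hf1, hf2⟩ <;> omega

theorem updMin_eq_min (x b j : Int) (hb : 0 ≤ b) : updMin x b j = min b |j - x| := by
  unfold updMin
  have h : (b == -1) = false := by simp only [beq_eq_false_iff_ne]; omega
  rw [h, Int.min_def]
  simp only [Bool.false_or]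
  generalize |j - x| = d
  split_ifs with h1 h2 <;> simp only [decide_eq_true_eq] at h1 <;> omega

theorem foldl_updMin_eq (x : Int) (t : List Int) : ∀ b : Int, 0 ≤ b →
    t.foldl (updMin x) b = (t.map (fun s => |s - x|)).foldl min b := by
  induction t with
  | nil => intro b _; rfl
  | cons s t ih =>
    intro b hb
    simp only [List.foldl_cons, List.map_cons]
    rw [updMin_eq_min x b s hb]
    exact ih _ (le_min hb (abs_nonneg _))

theorem bFold_spec (tl : List Int) (x : Int) (hne : tl ≠ []) :
    IsMinD (bFold tl x) tl x := by
  cases tl with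
  | nil => exact absurd rfl hne
  | cons j t =>
    have h0 : bFold (j :: t) x = (t.map (fun s => |s - x|)).foldl min |j - x| := by
      show List.foldl (updMin x) (updMin x (-1) j) t = _
      have h : updMin x (-1) j = |j - x| := by simp [updMin]
      rw [h]
      exact foldl_updMin_eq x t _ (abs_nonneg _)
    rw [h0]
    obtain ⟨hle, hall⟩ := PySem.List.foldl_min_le (t.map (fun s => |s - x|)) |j - x|
    constructor
    · rcases PySem.List.foldl_min_mem (t.map (fun s => |s - x|)) |j - x| with h | h
      · exact ⟨j, by simp, h⟩
      · obtain ⟨s, hs, hv⟩ := List.mem_map.mp h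
        exact ⟨s, by simp [hs], hv.symm⟩
    · intro s hs
      rcases List.mem_cons.mp hs with rfl | hs
      · exact hle
      · exact hall _ (List.mem_map_of_mem hs)

theorem aVal_eq_bFold (tl : List Int) (x : Int) (hs : tl.Pairwise (· < ·)) :
    aVal tl x = bFold tl x := by
  cases tl with
  | nil => simp [aVal, bFold]
  | cons h t => exact isMinD_unique (aVal_spec _ _ hs (by simp)) (bFold_spec _ _ (by simp))

theorem A_eq_map (colors : List Int) (queries : List (List Int)) :
    shortestDistanceColor colors queries
    = queries.map (fun q =>
        aVal (tlist colors (PySem.List.pyGetD q 1 0)) (PySem.List.pyGetD q 0 0)) := by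
  simp only [shortestDistanceColor]
  rw [PySem.List.foldl_congr_mem queries _
      (fun ans q => ans ++ [aVal (tlist colors (PySem.List.pyGetD q 1 0)) (PySem.List.pyGetD q 0 0)]) []
      ?_]
  · rw [PySem.List.foldl_append_singleton_eq_map]
    simp
  · intro ans q _
    rw [dict_getD]
    simp only [aVal]
    split_ifs <;> rfl

theorem B_eq_map (colors : List Int) (queries : List (List Int)) :
    shortestDistanceColor_alt colors queries
    = queries.map (fun q =>
        bFold (tlist colors (PySem.List.pyGetD q 1 0)) (PySem.List.pyGetD q 0 0)) := by
  unfold shortestDistanceColor_alt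
  refine List.map_congr_left (fun q _ => ?_)
  show (PySem.List.enumerate colors).foldl
      (fun best p => if p.2 == PySem.List.pyGetD q 1 0 then
        updMin (PySem.List.pyGetD q 0 0) best p.1 else best) (-1) = _
  have h1 := PySem.List.foldl_if_eq_foldl_filter (fun p : Int × Int => p.2 == PySem.List.pyGetD q 1 0)
      (fun best p => updMin (PySem.List.pyGetD q 0 0) best p.1) (PySem.List.enumerate colors) (-1)
  rw [h1, bFold, tlist, List.foldl_map]

-- ===== VERDICT (by name: the statement is the Claim_ definition above) =====
theorem shortestDistanceColor_spec : Claim_equal_shortestDistanceColor := by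
  intro colors queries _ _
  show shortestDistanceColor colors queries = shortestDistanceColor_alt colors queries
  rw [A_eq_map, B_eq_map]
  exact List.map_congr_left (fun q _ => aVal_eq_bFold _ _ (tlist_sorted colors _))
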